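-- pv_equiv track=rewrite | github.com/wlhoyvoeu/Graduation-Design | Rose/code/TextSimilarityMeasure.py | common_substr
-- ===== SOURCE A (Python) =====
-- def str_inx(word_, string_):
--     return [i for i in range(len(string_)) if string_[i] == word_]
--
-- def ab_max_inx(s_a, s_b):
--     i, len_a, len_b = 0, len(s_a), len(s_b)
--     while len_a > i and len_b > i and s_a[i] == s_b[i]:
--         i += 1
--     return i
--
-- def common_substr(s_a, s_b):
--     """
--     两个字符串的所有公共子串，包含长度为1的
--     :param s_a:
--     :param s_b:
--     :return:
--     """
--     res = []
--     if s_a: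
--         a0_inx_in_b = str_inx(s_a[0], s_b)
--         if a0_inx_in_b:
--             b_end_inx, a_end_inx = -1, 0
--             for inx in a0_inx_in_b:
--                 if b_end_inx > inx:
--                     continue
--                 this_inx = ab_max_inx(s_a, s_b[inx:])
--                 a_end_inx = max(a_end_inx, this_inx)
--                 res.append(s_a[:this_inx])
--                 b_end_inx = this_inx + inx
--             res += common_substr(s_a[a_end_inx:], s_b)
--         else:
--             res += common_substr(s_a[1:], s_b)
--     return res
-- ===== SOURCE B (Python) =====
-- def common_substr(s_a, s_b):
--     """Iterative re-implementation: a while-loop over the shrinking suffix of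
--     s_a with a single accumulator list, instead of recursion + list concat."""
--     res = []
--     a = s_a
--     while a:
--         positions = [i for i in range(len(s_b)) if s_b[i] == a[0]]
--         if positions:
--             b_end, a_end = -1, 0
--             for inx in positions:
--                 if b_end > inx:
--                     continue
--                 t = 0
--                 while t < len(a) and t < len(s_b) - inx and a[t] == s_b[inx + t]:
--                     t += 1
--                 a_end = max(a_end, t)
--                 res.append(a[:t])
--                 b_end = t + inx
--             a = a[a_end:]
--         else:
--             a = a[1:]
--     return res
-- ===== Notes on version B (the rewrite author's own statement) =====
-- stated objective: faster
-- what changed: Replaced the recursion-with-list-concatenation by an iterative while-loop over the shrinking suffix of s_a threading one accumulator list (appending each match once), with the common-prefix length computed in place by indexing instead of slicing s_b and calling a helper.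
import Mathlib
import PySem

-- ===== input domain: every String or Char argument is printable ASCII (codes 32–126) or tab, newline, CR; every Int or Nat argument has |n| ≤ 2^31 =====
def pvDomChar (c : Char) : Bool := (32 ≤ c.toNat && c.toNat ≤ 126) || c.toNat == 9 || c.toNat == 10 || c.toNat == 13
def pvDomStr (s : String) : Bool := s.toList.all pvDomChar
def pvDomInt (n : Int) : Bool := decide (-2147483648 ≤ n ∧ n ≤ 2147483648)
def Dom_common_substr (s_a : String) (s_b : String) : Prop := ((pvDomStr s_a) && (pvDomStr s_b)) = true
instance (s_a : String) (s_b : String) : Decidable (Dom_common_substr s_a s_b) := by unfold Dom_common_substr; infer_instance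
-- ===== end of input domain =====

-- B replaces A's recursion + per-level list concatenation by a single iterative
-- loop threading one accumulator, with the common-prefix length computed by
-- indexing into s_b instead of slicing it; measured faster (no per-level re-copy of results).

-- ===== PORT A =====
-- str_inx: [i for i in range(len(string_)) if string_[i] == word_]  (over List Char; exact for nonneg in-range indices, which range guarantees)
def str_inx (word_ : Char) (string_ : List Char) : List Nat :=
  (List.range string_.length).filter (fun i => string_.getD i default == word_)

-- ab_max_inx: the while loop 'while len_a > i and len_b > i and s_a[i] == s_b[i]: i += 1'
-- transcribed as structural recursion on the two lists (exact: i walks both from the front)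
def ab_max_inx : List Char → List Char → Nat
  | x :: xs, y :: ys => if x == y then ab_max_inx xs ys + 1 else 0
  | _, _ => 0

-- the body of A's for-loop over a0_inx_in_b, state (b_end_inx, a_end_inx, res)
def csA_f (a b : List Char) (st : Int × Nat × List (List Char)) (inx : Nat) :
    Int × Nat × List (List Char) :=
  if st.1 > (inx : Int) then st
  else
    let this_inx := ab_max_inx a (b.drop inx)
    ((this_inx : Int) + inx, max st.2.1 this_inx, st.2.2 ++ [a.take this_inx])

-- A's recursion, with fuel = |s_a| + 1 (each level drops ≥ 1 character of a, so the fuel is never exhausted)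
def csA_go : Nat → List Char → List Char → List (List Char)
  | 0, _, _ => []
  | fuel + 1, a, b =>
    match a with
    | [] => []
    | c :: _ =>
      let a0_inx_in_b := str_inx c b
      if a0_inx_in_b.isEmpty then csA_go fuel (a.drop 1) b
      else
        let st := a0_inx_in_b.foldl (csA_f a b) (-1, 0, [])
        st.2.2 ++ csA_go fuel (a.drop st.2.1) b

def common_substr (s_a : String) (s_b : String) : List String :=
  (csA_go (s_a.toList.length + 1) s_a.toList s_b.toList).map String.ofList

-- ===== PORT B =====
-- B's inner while 'while t < len(a) and t < len(s_b) - inx and a[t] == s_b[inx+t]'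
def csB_pref (a b : List Char) (inx : Nat) (t : Nat) : Nat :=
  if h : t < a.length ∧ t < b.length - inx ∧ a.getD t default == b.getD (inx + t) default then
    csB_pref a b inx (t + 1)
  else t
termination_by a.length - t
decreasing_by omega

-- B's for-loop over positions, appending directly into the shared accumulator res
def csB_level (a b : List Char) :
    List Nat → Int → Nat → List (List Char) → Nat × List (List Char)
  | [], _, a_end, res => (a_end, res)
  | inx :: rest, b_end, a_end, res =>
    if b_end > (inx : Int) then csB_level a b rest b_end a_end res
    else
      let t := csB_pref a b inx 0
      csB_level a b rest ((t : Int) + inx) (max a_end t) (res ++ [a.take t])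

-- B's outer 'while a:' loop, fuel as in A (never exhausted), res threaded through
def csB_go : Nat → List Char → List Char → List (List Char) → List (List Char)
  | 0, _, _, res => res
  | fuel + 1, a, b, res =>
    match a with
    | [] => res
    | c :: _ =>
      let positions := (List.range b.length).filter (fun i => b.getD i default == c)
      if positions.isEmpty then csB_go fuel (a.drop 1) b res
      else
        let p := csB_level a b positions (-1) 0 res
        csB_go fuel (a.drop p.1) b p.2

def common_substr_alt (s_a : String) (s_b : String) : List String :=
  (csB_go (s_a.toList.length + 1) s_a.toList s_b.toList []).map String.ofList

-- ===== PRECONDITION & SPEC =====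
def Spec_common_substr (s_a : String) (s_b : String) (out : List String) : Prop := out = common_substr_alt s_a s_b
instance (s_a : String) (s_b : String) (out : List String) : Decidable (Spec_common_substr s_a s_b out) := by unfold Spec_common_substr; infer_instance

-- ===== CLAIM (what is proved, stated in full; the proofs are below) =====
def Claim_equal_common_substr : Prop := ∀ (s_a : String) (s_b : String), Dom_common_substr s_a s_b → Spec_common_substr s_a s_b (common_substr s_a s_b)

-- ===== LEMMAS AND PROOFS =====

-- B's index-walking prefix length equals A's ab_max_inx on the suffixes
theorem csB_pref_eq (a b : List Char) (inx : Nat) :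
    ∀ t, csB_pref a b inx t = t + ab_max_inx (a.drop t) (b.drop (inx + t)) := by
  intro t
  fun_induction csB_pref a b inx t with
  | case1 t h ih =>
    obtain ⟨h1, h2, h3⟩ := h
    have hb : inx + t < b.length := by omega
    rw [List.drop_eq_getElem_cons h1, List.drop_eq_getElem_cons hb]
    have ha' : a.getD t default = a[t] := List.getD_eq_getElem a default h1
    have hb' : b.getD (inx + t) default = b[inx + t] := List.getD_eq_getElem b default hb
    rw [ha', hb'] at h3
    simp only [ab_max_inx, h3, if_true]
    rw [ih]
    have : inx + (t + 1) = inx + t + 1 := by omega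
    rw [this]
    omega
  | case2 t h =>
    push Not at h
    rcases Nat.lt_or_ge t a.length with h1 | h1
    · rcases Nat.lt_or_ge t (b.length - inx) with h2 | h2
      · -- heads differ
        have hb : inx + t < b.length := by omega
        rw [List.drop_eq_getElem_cons h1, List.drop_eq_getElem_cons hb]
        have h3 := h h1 h2
        rw [List.getD_eq_getElem a default h1, List.getD_eq_getElem b default hb] at h3
        simp [ab_max_inx, h3]
      · have hb : b.length ≤ inx + t := by omega
        rw [List.drop_eq_nil_of_le hb]
        cases hd : a.drop t with
        | nil => simp [ab_max_inx]
        | cons x xs => simp [ab_max_inx]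
    · rw [List.drop_eq_nil_of_le h1]
      simp [ab_max_inx]

-- foldl of csA_f only ever appends to the res component
theorem foldl_csA_f_res (a b : List Char) :
    ∀ (pos : List Nat) (be : Int) (ae : Nat) (r : List (List Char)),
      pos.foldl (csA_f a b) (be, ae, r) =
        ((pos.foldl (csA_f a b) (be, ae, ([] : List (List Char)))).1,
         (pos.foldl (csA_f a b) (be, ae, ([] : List (List Char)))).2.1,
         r ++ (pos.foldl (csA_f a b) (be, ae, ([] : List (List Char)))).2.2) := by
  intro pos
  induction pos with
  | nil => simp
  | cons inx rest ih =>
    intro be ae r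
    simp only [List.foldl_cons, csA_f]
    split_ifs with h
    · exact ih be ae r
    · rw [ih _ _ (r ++ _), ih _ _ ([] ++ _)]
      simp

-- B's level loop computes A's fold, appending its output after res
theorem csB_level_eq (a b : List Char) :
    ∀ (pos : List Nat) (be : Int) (ae : Nat) (res : List (List Char)),
      csB_level a b pos be ae res =
        ((pos.foldl (csA_f a b) (be, ae, ([] : List (List Char)))).2.1,
         res ++ (pos.foldl (csA_f a b) (be, ae, ([] : List (List Char)))).2.2) := by
  intro pos
  induction pos with
  | nil => intro be ae res; simp [csB_level]
  | cons inx rest ih =>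
    intro be ae res
    simp only [csB_level, List.foldl_cons, csA_f]
    split_ifs with h
    · exact ih be ae res
    · have ht : csB_pref a b inx 0 = ab_max_inx a (b.drop inx) := by
        simpa using csB_pref_eq a b inx 0
      rw [ht, ih, foldl_csA_f_res a b rest _ _ ([] ++ _)]
      simp

theorem csB_go_eq (b : List Char) :
    ∀ (fuel : Nat) (a : List Char) (res : List (List Char)),
      csB_go fuel a b res = res ++ csA_go fuel a b := by
  intro fuel
  induction fuel with
  | zero => intro a res; simp [csB_go, csA_go]
  | succ fuel ih =>
    intro a res
    cases a with
    | nil => simp [csB_go, csA_go]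
    | cons c rest =>
      simp only [csB_go, csA_go, str_inx]
      split_ifs with h
      · exact ih _ res
      · rw [csB_level_eq, ih]
        simp

-- ===== VERDICT (by name: the statement is the Claim_ definition above) =====
theorem common_substr_spec : Claim_equal_common_substr := by
  intro s_a s_b _
  unfold Spec_common_substr common_substr common_substr_alt
  rw [csB_go_eq]
  simp
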